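-- pv_equiv track=rewrite | github.com/IlliaKupratyi/yt_dlp_gui | src/utils/console_output_util.py | has_error
-- ===== SOURCE A (Python) =====
-- def has_error( output_lines: list[str]) -> bool:
--     error_indicators = [
--         "ERROR:",
--         "Unable to extract",
--         "Incomplete YouTube ID",
--         "Invalid URL",
--         "Unsupported URL",
--         "Video unavailable"
--     ]
--     return any(
--         any(indicator in line for indicator in error_indicators)
--         for line in output_lines
--     )
-- ===== SOURCE B (Python) =====
-- def has_error(output_lines: list[str]) -> bool:
--     error_indicators = (
--         "ERROR:",
--         "Unable to extract",
--         "Incomplete YouTube ID",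
--         "Invalid URL",
--         "Unsupported URL",
--         "Video unavailable"
--     )
--     for line in output_lines:
--         for j in range(len(line)):
--             if line.startswith(error_indicators, j):
--                 return True
--     return False
-- ===== Notes on version B (the rewrite author's own statement) =====
-- stated objective: alternative
-- what changed: Replaced the indicator-driven nested substring-membership scan (for each indicator, search the whole line) by a position-driven scan with early return: walk each line's start positions once and test, via tuple startswith at that offset, whether any indicator begins there.
import Mathlib
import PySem

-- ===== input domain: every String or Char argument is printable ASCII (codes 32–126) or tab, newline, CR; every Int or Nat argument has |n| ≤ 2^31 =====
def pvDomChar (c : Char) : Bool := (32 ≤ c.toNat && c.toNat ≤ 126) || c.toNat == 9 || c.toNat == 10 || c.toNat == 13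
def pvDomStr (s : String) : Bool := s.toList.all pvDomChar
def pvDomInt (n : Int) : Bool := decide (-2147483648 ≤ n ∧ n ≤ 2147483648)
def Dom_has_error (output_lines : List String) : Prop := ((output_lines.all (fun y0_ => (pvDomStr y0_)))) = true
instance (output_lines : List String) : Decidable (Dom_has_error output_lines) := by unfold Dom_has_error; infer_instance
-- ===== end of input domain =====

-- B replaces A's indicator-driven substring-membership double loop by a position-driven
-- scan with early return (prefix test of all indicators at each start offset); objective: alternative.


-- ===== PORT A =====
def errorIndicators : List String :=
  ["ERROR:", "Unable to extract", "Incomplete YouTube ID",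
   "Invalid URL", "Unsupported URL", "Video unavailable"]

-- any(any(indicator in line for indicator in error_indicators) for line in output_lines)
def has_error (output_lines : List String) : Bool :=
  output_lines.any (fun line => errorIndicators.any (fun ind => PySem.Str.isIn ind line))

-- ===== PORT B =====
def errorIndicatorsB : List (List Char) :=
  ["ERROR:".toList, "Unable to extract".toList, "Incomplete YouTube ID".toList,
   "Invalid URL".toList, "Unsupported URL".toList, "Video unavailable".toList]

-- line.startswith(error_indicators, j) : tuple startswith at offset j (exact: 0 ≤ j < len(line))
def startsAnyAt (cs : List Char) (j : Nat) : Bool :=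
  errorIndicatorsB.any (fun p => PySem.Chars.startswith (cs.drop j) p)

-- 'for line in output_lines: for j in range(len(line)): if …: return True' / 'return False'
def has_error_alt : List String → Bool
  | [] => false
  | line :: rest =>
    if (List.range line.toList.length).any (startsAnyAt line.toList) then true
    else has_error_alt rest

-- ===== PRECONDITION & SPEC =====
def Spec_has_error (output_lines : List String) (out : Bool) : Prop := out = has_error_alt output_lines
instance (output_lines : List String) (out : Bool) : Decidable (Spec_has_error output_lines out) := by unfold Spec_has_error; infer_instance

-- ===== CLAIM (what is proved, stated in full; the proofs are below) =====
def Claim_equal_has_error : Prop := ∀ (output_lines : List String), Dom_has_error output_lines → Spec_has_error output_lines (has_error output_lines)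

-- ===== LEMMAS AND PROOFS =====

-- For a nonempty pattern, 'sub in cs' holds iff sub is a prefix of some suffix cs.drop j, j < |cs|.
theorem isIn_iff_exists_lt (sub cs : List Char) (hne : sub ≠ []) :
    PySem.Chars.isIn sub cs = true ↔ ∃ j < cs.length, PySem.Chars.startswith (cs.drop j) sub = true := by
  rw [← PySem.Chars.exists_prefix_drop_iff_isIn]
  constructor
  · rintro ⟨j, hj⟩
    refine ⟨min j (cs.length - 1), ?_, ?_⟩
    · rcases cs with _ | ⟨c, t⟩
      · simp at hj; exact absurd hj hne
      · simp
    · rw [PySem.Chars.startswith_iff]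
      rcases Nat.lt_or_ge j cs.length with h | h
      · simpa [Nat.min_eq_left (by omega : j ≤ cs.length - 1)] using hj
      · rw [List.drop_eq_nil_of_le h] at hj
        exact absurd (List.prefix_nil.mp hj) hne
  · rintro ⟨j, _, hj⟩
    exact ⟨j, (PySem.Chars.startswith_iff _ _).mp hj⟩

theorem line_eq (line : String) :
    errorIndicators.any (fun ind => PySem.Str.isIn ind line)
      = (List.range line.toList.length).any (startsAnyAt line.toList) := by
  rw [Bool.eq_iff_iff]
  simp only [List.any_eq_true, startsAnyAt, List.mem_range]
  constructor
  · rintro ⟨ind, hind, hin⟩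
    rw [PySem.Str.isIn_eq] at hin
    have hne : ind.toList ≠ [] := by
      fin_cases hind <;> decide
    obtain ⟨j, hj, hs⟩ := (isIn_iff_exists_lt ind.toList line.toList hne).mp hin
    exact ⟨j, hj, ind.toList, by fin_cases hind <;> simp [errorIndicatorsB], hs⟩
  · rintro ⟨j, hj, p, hp, hs⟩
    have hex : ∃ ind ∈ errorIndicators, ind.toList = p := by
      fin_cases hp <;> exact ⟨_, by simp [errorIndicators], rfl⟩
    obtain ⟨ind, hind, rfl⟩ := hex
    refine ⟨ind, hind, ?_⟩
    rw [PySem.Str.isIn_eq]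
    have hne : ind.toList ≠ [] := by fin_cases hind <;> decide
    exact (isIn_iff_exists_lt ind.toList line.toList hne).mpr ⟨j, hj, hs⟩

theorem both_eq (ls : List String) : has_error ls = has_error_alt ls := by
  induction ls with
  | nil => rfl
  | cons l t ih =>
    have hA : has_error (l :: t)
        = ((errorIndicators.any (fun ind => PySem.Str.isIn ind l)) || has_error t) := rfl
    rw [hA, has_error_alt, ← line_eq, ih]
    cases hc : errorIndicators.any (fun ind => PySem.Str.isIn ind l) <;> simp

-- ===== VERDICT (by name: the statement is the Claim_ definition above) =====
theorem has_error_spec : Claim_equal_has_error := by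
  intro ls _
  exact both_eq ls
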